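-- pv_equiv track=rewrite | github.com/dendrite-systems/dendrite-python-sdk | dendrite/logic/dom/css.py | css_escape
-- ===== SOURCE A (Python) =====
-- def css_escape(value):
--     if len(str(value)) == 0:
--         raise TypeError("`CSS.escape` requires an argument.")
--
--     string = str(value)
--     length = len(string)
--     result = ""
--     first_code_unit = ord(string[0]) if length > 0 else None
--
--     if length == 1 and first_code_unit == 0x002D:
--         return "\\" + string
--
--     for index in range(length):
--         code_unit = ord(string[index])
--
--         if code_unit == 0x0000:
--             result += "\uFFFD"
--             continue
--
--         if (
--             (0x0001 <= code_unit <= 0x001F)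
--             or code_unit == 0x007F
--             or (index == 0 and 0x0030 <= code_unit <= 0x0039)
--             or (
--                 index == 1
--                 and 0x0030 <= code_unit <= 0x0039
--                 and first_code_unit == 0x002D
--             )
--         ):
--             result += "\\" + format(code_unit, "x") + " "
--             continue
--
--         if (
--             code_unit >= 0x0080
--             or code_unit == 0x002D
--             or code_unit == 0x005F
--             or 0x0030 <= code_unit <= 0x0039
--             or 0x0041 <= code_unit <= 0x005A
--             or 0x0061 <= code_unit <= 0x007A
--         ):
--             result += string[index]
--             continue
--
--         result += "\\" + string[index]
--
--     return result
-- ===== SOURCE B (Python) =====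
-- import re
--
-- # Regex-driven CSS.escape: one ordered-alternation pattern scanned by re.sub.
-- # Alternatives, in order: NUL; other controls/DEL; a leading digit; a digit
-- # right after a leading '-'; any character not in the safe class
-- # (codepoints >= 0x80, '-', '_', digits, letters). Safe characters never match
-- # and are copied through by re.sub.
-- _PATTERN = re.compile(
--     r'\x00'
--     r'|[\x01-\x1f\x7f]'
--     r'|^[0-9]'
--     r'|(?<=^-)[0-9]'
--     r'|[^\u0080-\U0010ffff\-_0-9A-Za-z]'
-- )
--
-- def _repl(m):
--     ch = m.group(0)
--     cp = ord(ch)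
--     if cp == 0:
--         return '\uFFFD'
--     if cp <= 0x1F or cp == 0x7F or ch.isdigit():
--         return '\\' + format(cp, 'x') + ' '
--     return '\\' + ch
--
-- def css_escape(value):
--     string = str(value)
--     if not string:
--         raise TypeError('`CSS.escape` requires an argument.')
--     if string == '-':
--         return '\\-'
--     return _PATTERN.sub(_repl, string)
-- ===== Notes on version B (the rewrite author's own statement) =====
-- stated objective: idiomatic
-- what changed: A classifies each character in an explicit index-tracking Python accumulator loop; B builds one regex with ordered alternation (NUL | controls/DEL | anchored leading digit | lookbehind digit-after-leading-dash | non-safe catch-all) and lets re.sub with a replacement function do the scan, safe characters being copied through unmatched by the C regex engine.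
import Mathlib
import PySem

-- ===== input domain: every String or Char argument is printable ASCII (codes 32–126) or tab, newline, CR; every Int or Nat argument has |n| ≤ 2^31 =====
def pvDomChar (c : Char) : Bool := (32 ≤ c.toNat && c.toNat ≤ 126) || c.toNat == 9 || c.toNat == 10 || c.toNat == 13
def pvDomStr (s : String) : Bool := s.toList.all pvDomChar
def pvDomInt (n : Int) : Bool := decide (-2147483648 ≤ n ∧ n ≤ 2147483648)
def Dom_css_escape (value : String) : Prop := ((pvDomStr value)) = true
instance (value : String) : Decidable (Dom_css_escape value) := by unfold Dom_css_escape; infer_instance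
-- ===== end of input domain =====

-- B replaces A's index-tracking accumulator loop by a single ordered-alternation regex
-- applied with re.sub and a replacement function (objective: idiomatic). Equivalence of
-- the return values proved on nonempty strings (both Pythons raise TypeError on "").

-- exact port of Python's format(cp, "x") for 0 < cp < 256 (the only values reaching it here)
def pvHexDigit (n : Nat) : Char := if n < 10 then Char.ofNat (48 + n) else Char.ofNat (87 + n)
def pvHex (n : Nat) : List Char := if n < 16 then [pvHexDigit n] else [pvHexDigit (n / 16), pvHexDigit (n % 16)]

-- ===== PORT A =====
def cssALoop (first : Nat) : List Char → Nat → List Char → List Char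
  | [], _, result => result
  | c :: rest, index, result =>
    let cu := c.toNat
    if cu = 0 then
      cssALoop first rest (index + 1) (result ++ ['\uFFFD'])
    else if (1 ≤ cu ∧ cu ≤ 0x1F) ∨ cu = 0x7F ∨ (index = 0 ∧ 0x30 ≤ cu ∧ cu ≤ 0x39)
            ∨ (index = 1 ∧ 0x30 ≤ cu ∧ cu ≤ 0x39 ∧ first = 0x2D) then
      cssALoop first rest (index + 1) (result ++ '\\' :: pvHex cu ++ [' '])
    else if 0x80 ≤ cu ∨ cu = 0x2D ∨ cu = 0x5F ∨ (0x30 ≤ cu ∧ cu ≤ 0x39)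
            ∨ (0x41 ≤ cu ∧ cu ≤ 0x5A) ∨ (0x61 ≤ cu ∧ cu ≤ 0x7A) then
      cssALoop first rest (index + 1) (result ++ [c])
    else
      cssALoop first rest (index + 1) (result ++ ['\\', c])

def css_escape (value : String) : String :=
  let string := value.toList
  let length := string.length
  if length = 0 then ""  -- Python A raises TypeError here; excluded by Pre_
  else
    let first := (string.headD (Char.ofNat 0)).toNat   -- ord(string[0])
    if length = 1 ∧ first = 0x2D then String.mk ('\\' :: string)
    else String.mk (cssALoop first string 0 [])

-- ===== PORT B =====
-- Port of _PATTERN, by hand (PySem has no regex): every alternative matches exactly one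
-- character, '^' anchors at index 0 and the fixed-width lookbehind '(?<=^-)' holds exactly
-- at index 1 of a string whose first character is '-', so "does the pattern match at this
-- position" is this predicate of (first codepoint, index, codepoint); exact on all inputs.
def bMatch (firstCp index cp : Nat) : Bool :=
  decide (cp = 0
    ∨ (1 ≤ cp ∧ cp ≤ 0x1F) ∨ cp = 0x7F
    ∨ (index = 0 ∧ 0x30 ≤ cp ∧ cp ≤ 0x39)
    ∨ (index = 1 ∧ firstCp = 0x2D ∧ 0x30 ≤ cp ∧ cp ≤ 0x39)
    ∨ ¬(0x80 ≤ cp ∨ cp = 0x2D ∨ cp = 0x5F ∨ (0x30 ≤ cp ∧ cp ≤ 0x39)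
        ∨ (0x41 ≤ cp ∧ cp ≤ 0x5A) ∨ (0x61 ≤ cp ∧ cp ≤ 0x7A)))

-- port of _repl (called only on matched characters)
def bRepl (c : Char) : List Char :=
  let cp := c.toNat
  if cp = 0 then ['\uFFFD']
  else if cp ≤ 0x1F ∨ cp = 0x7F ∨ (0x30 ≤ cp ∧ cp ≤ 0x39) then '\\' :: pvHex cp ++ [' ']
  else ['\\', c]

-- port of re.sub's scan: each match is one character wide, so sub walks the positions,
-- substituting bRepl on a match and copying the character otherwise; exact here.
def bSub (firstCp : Nat) : Nat → List Char → List Char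
  | _, [] => []
  | i, c :: rest => (if bMatch firstCp i c.toNat then bRepl c else [c]) ++ bSub firstCp (i + 1) rest

def css_escape_alt (value : String) : String :=
  match value.toList with
  | [] => ""  -- Python B raises TypeError here; excluded by Pre_
  | c0 :: rest =>
    if c0 :: rest = ['-'] then "\\-"
    else String.mk (bSub c0.toNat 0 (c0 :: rest))

-- ===== PRECONDITION & SPEC =====
-- Pre_ excludes only the empty string, on which both Pythons raise TypeError.
def Pre_css_escape (value : String) : Prop := value ≠ ""
instance (value : String) : Decidable (Pre_css_escape value) := by unfold Pre_css_escape; infer_instance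
def pvWitness_css_escape : String := "-a1"

def Spec_css_escape (value : String) (out : String) : Prop := out = css_escape_alt value
instance (value : String) (out : String) : Decidable (Spec_css_escape value out) := by unfold Spec_css_escape; infer_instance

-- ===== CLAIM (what is proved, stated in full; the proofs are below) =====
def Claim_equal_css_escape : Prop := ∀ (value : String), Dom_css_escape value → Pre_css_escape value → Spec_css_escape value (css_escape value)

-- ===== LEMMAS AND PROOFS =====

-- A's loop emits, per character, exactly "bRepl if the regex matches here, else the character"
lemma cssALoop_eq_bSub (first : Nat) (l : List Char) (idx : Nat) (acc : List Char) :
    cssALoop first l idx acc = acc ++ bSub first idx l := by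
  induction l generalizing idx acc with
  | nil => simp [cssALoop, bSub]
  | cons c rest ih =>
    have hstep : bSub first idx (c :: rest)
        = (if bMatch first idx c.toNat then bRepl c else [c]) ++ bSub first (idx + 1) rest := rfl
    simp only [cssALoop]
    split_ifs with h1 h2 h3
    · rw [ih, hstep, if_pos (by simp only [bMatch, decide_eq_true_eq]; omega)]
      simp [bRepl, h1]
    · rw [ih, hstep, if_pos (by simp only [bMatch, decide_eq_true_eq]; omega)]
      have hr : bRepl c = '\\' :: pvHex c.toNat ++ [' '] := by
        simp only [bRepl]
        rw [if_neg h1, if_pos (by omega)]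
      rw [hr]; simp
    · rw [ih, hstep, if_neg (by simp only [bMatch, decide_eq_true_eq]; omega)]
      simp
    · rw [ih, hstep, if_pos (by simp only [bMatch, decide_eq_true_eq]; omega)]
      have hr : bRepl c = ['\\', c] := by
        simp only [bRepl]
        rw [if_neg h1, if_neg (by omega)]
      rw [hr]; simp

lemma char_eq_dash (c : Char) (h : c.toNat = 0x2D) : c = '-' := by
  apply Char.ext
  apply UInt32.toNat_inj.mp
  show c.toNat = ('-' : Char).toNat
  rw [h]
  decide

-- ===== VERDICT (by name: the statement is the Claim_ definition above) =====
theorem css_escape_spec : Claim_equal_css_escape := by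
  intro value _hdom hpre
  unfold Spec_css_escape css_escape css_escape_alt
  have hne : value.toList ≠ [] := by
    intro h
    exact hpre (by ext1; simpa using congrArg id h)
  cases hcs : value.toList with
  | nil => exact absurd hcs hne
  | cons c0 tl =>
    simp only [List.length_cons, List.headD]
    rw [if_neg (by simp)]
    by_cases hdash : tl = [] ∧ c0.toNat = 0x2D
    · obtain ⟨rfl, hd⟩ := hdash
      rw [char_eq_dash c0 hd]
      decide
    · have hA : ¬ (tl.length + 1 = 1 ∧ c0.toNat = 0x2D) := by
        rintro ⟨hl, hd⟩
        exact hdash ⟨List.eq_nil_of_length_eq_zero (by omega), hd⟩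
      have hB : ¬ (c0 :: tl = ['-']) := by
        rintro h
        cases h
        exact hdash ⟨rfl, by decide⟩
      rw [if_neg hA, if_neg hB, cssALoop_eq_bSub]
      simp
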